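-- pv_equiv track=rewrite | github.com/bendichter/dandi-sql | dandisets/management/commands/sync_dandi_incremental.py | _has_problematic_unicode
-- ===== SOURCE A (Python) =====
-- def _has_problematic_unicode(text):
--     """Check if text contains problematic Unicode escape sequences"""
--     if not isinstance(text, str):
--         return False
--
--     # Check for null bytes and other control characters
--     problematic_sequences = [
--         '\\u0000', '\\u0001', '\\u0002', '\\u0003', '\\u0004', '\\u0005',
--         '\\u0006', '\\u0007', '\\u0008', '\\u000b', '\\u000c', '\\u000e',
--         '\\u000f', '\\u0010', '\\u0011', '\\u0012', '\\u0013', '\\u0014',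
--         '\\u0015', '\\u0016', '\\u0017', '\\u0018', '\\u0019', '\\u001a',
--         '\\u001b', '\\u001c', '\\u001d', '\\u001e', '\\u001f'
--     ]
--
--     return any(seq in text for seq in problematic_sequences)
-- ===== SOURCE B (Python) =====
-- def _has_problematic_unicode(text):
--     """Single left-to-right scan instead of 29 separate substring searches."""
--     if not isinstance(text, str):
--         return False
--     for i in range(len(text) - 5):
--         if text[i] == '\\' and text[i + 1] == 'u' and text[i + 2] == '0' and text[i + 3] == '0':
--             d1 = text[i + 4]
--             d2 = text[i + 5]
--             if (d1 == '0' and d2 in '012345678bcef') or (d1 == '1' and d2 in '0123456789abcdef'):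
--                 return True
--     return False
-- ===== Notes on version B (the rewrite author's own statement) =====
-- stated objective: simpler
-- what changed: A searches the text 29 times, once per literal escape sequence; B makes a single left-to-right scan that looks for the prefix '\u00' and then tests the two following hex digits against the allowed set.
import Mathlib
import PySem

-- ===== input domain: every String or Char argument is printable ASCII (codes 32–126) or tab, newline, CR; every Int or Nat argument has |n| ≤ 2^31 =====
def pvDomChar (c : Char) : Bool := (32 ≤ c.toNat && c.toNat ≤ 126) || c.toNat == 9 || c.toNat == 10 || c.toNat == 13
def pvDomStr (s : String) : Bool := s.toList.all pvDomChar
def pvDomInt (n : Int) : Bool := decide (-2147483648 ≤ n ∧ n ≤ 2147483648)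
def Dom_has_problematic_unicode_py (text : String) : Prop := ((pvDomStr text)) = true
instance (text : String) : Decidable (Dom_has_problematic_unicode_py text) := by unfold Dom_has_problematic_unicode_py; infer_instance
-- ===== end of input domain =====

-- B replaces A's 29 independent substring searches with one left-to-right scan of the text (objective: simpler single pass).

-- ===== PORT A =====
def pvProblematicSequences : List String :=
  ["\\u0000", "\\u0001", "\\u0002", "\\u0003", "\\u0004", "\\u0005",
   "\\u0006", "\\u0007", "\\u0008", "\\u000b", "\\u000c", "\\u000e",
   "\\u000f", "\\u0010", "\\u0011", "\\u0012", "\\u0013", "\\u0014",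
   "\\u0015", "\\u0016", "\\u0017", "\\u0018", "\\u0019", "\\u001a",
   "\\u001b", "\\u001c", "\\u001d", "\\u001e", "\\u001f"]

def has_problematic_unicode_py (text : String) : Bool :=
  pvProblematicSequences.any (fun seq => PySem.Str.isIn seq text)

-- ===== PORT B =====
-- the character lists of B's digit strings '012345678bcef' and '0123456789abcdef'
def pvDigits0 : List Char := ['0','1','2','3','4','5','6','7','8','b','c','e','f']
def pvDigits1 : List Char := ['0','1','2','3','4','5','6','7','8','9','a','b','c','d','e','f']

-- B's inner condition: text[i..i+3] == '\u00' and the next two chars are an allowed hex pair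
def pvHit (c0 c1 c2 c3 d1 d2 : Char) : Bool :=
  c0 == '\\' && c1 == 'u' && c2 == '0' && c3 == '0' &&
    ((d1 == '0' && pvDigits0.contains d2) || (d1 == '1' && pvDigits1.contains d2))

-- B's loop 'for i in range(len(text) - 5)' as a scan over the suffixes of the text
def pvScan : List Char → Bool
  | c0 :: c1 :: c2 :: c3 :: c4 :: c5 :: rest =>
      if pvHit c0 c1 c2 c3 c4 c5 then true
      else pvScan (c1 :: c2 :: c3 :: c4 :: c5 :: rest)
  | _ => false

def has_problematic_unicode_py_alt (text : String) : Bool :=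
  pvScan text.toList

-- ===== PRECONDITION & SPEC =====
def Spec_has_problematic_unicode_py (text : String) (out : Bool) : Prop := out = has_problematic_unicode_py_alt text
instance (text : String) (out : Bool) : Decidable (Spec_has_problematic_unicode_py text out) := by unfold Spec_has_problematic_unicode_py; infer_instance

-- ===== CLAIM (what is proved, stated in full; the proofs are below) =====
def Claim_equal_has_problematic_unicode_py : Prop := ∀ (text : String), Dom_has_problematic_unicode_py text → Spec_has_problematic_unicode_py text (has_problematic_unicode_py text)

-- ===== LEMMAS AND PROOFS =====

lemma pvSeqs_len : ∀ s ∈ pvProblematicSequences, s.toList.length = 6 := by decide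

-- pvHit on a 6-char window, as a function of the window list (proof helper)
def pvHitL : List Char → Bool
  | [c0, c1, c2, c3, c4, c5] => pvHit c0 c1 c2 c3 c4 c5
  | _ => false

lemma pvHitL_seqs : ∀ s ∈ pvProblematicSequences, pvHitL s.toList = true := by decide

lemma pvHit_iff (c0 c1 c2 c3 c4 c5 : Char) :
    pvHit c0 c1 c2 c3 c4 c5 = true ↔
    ∃ s ∈ pvProblematicSequences, s.toList = [c0, c1, c2, c3, c4, c5] := by
  constructor
  · intro h
    simp only [pvHit, pvDigits0, pvDigits1, Bool.and_eq_true, Bool.or_eq_true, beq_iff_eq,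
      List.contains_eq_mem, List.mem_cons, List.not_mem_nil, or_false, decide_eq_true_eq] at h
    obtain ⟨⟨⟨⟨h0, h1⟩, h2⟩, h3⟩, h45⟩ := h
    subst h0; subst h1; subst h2; subst h3
    rcases h45 with ⟨h4, h5⟩ | ⟨h4, h5⟩ <;> subst h4 <;>
      rcases h5 with rfl | rfl | rfl | rfl | rfl | rfl | rfl | rfl | rfl | rfl | rfl | rfl | rfl |
        rfl | rfl | rfl <;> decide
  · rintro ⟨s, hs, he⟩
    have h := pvHitL_seqs s hs
    rw [he] at h
    simpa [pvHitL] using h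

lemma pvPrefix_six {s : List Char} (h : s.length = 6) (c0 c1 c2 c3 c4 c5 : Char)
    (rest : List Char) :
    s <+: c0 :: c1 :: c2 :: c3 :: c4 :: c5 :: rest ↔ s = [c0, c1, c2, c3, c4, c5] := by
  rw [List.prefix_iff_eq_take, h]
  simp

lemma pvAny_short (l : List Char) (h : l.length < 6) :
    pvProblematicSequences.any (fun s => PySem.Chars.isIn s.toList l) = false := by
  simp only [List.any_eq_false]
  intro s hs
  simp only [PySem.Chars.isIn_iff_infix]
  intro hinf
  have h1 := hinf.length_le
  have h2 := pvSeqs_len s hs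
  omega

lemma pvAny_eq_scan (l : List Char) :
    pvProblematicSequences.any (fun s => PySem.Chars.isIn s.toList l) = pvScan l := by
  induction l with
  | nil => rw [pvAny_short _ (by simp)]; rfl
  | cons c0 t ih =>
    rcases t with _ | ⟨c1, _ | ⟨c2, _ | ⟨c3, _ | ⟨c4, _ | ⟨c5, rest⟩⟩⟩⟩⟩
    · rw [pvAny_short _ (by simp)]; rfl
    · rw [pvAny_short _ (by simp)]; rfl
    · rw [pvAny_short _ (by simp)]; rfl
    · rw [pvAny_short _ (by simp)]; rfl
    · rw [pvAny_short _ (by simp)]; rfl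
    · rw [pvScan]
      by_cases hhit : pvHit c0 c1 c2 c3 c4 c5 = true
      · rw [if_pos hhit, List.any_eq_true]
        obtain ⟨s, hs, he⟩ := (pvHit_iff c0 c1 c2 c3 c4 c5).mp hhit
        refine ⟨s, hs, ?_⟩
        rw [PySem.Chars.isIn_iff_infix]
        exact ((pvPrefix_six (pvSeqs_len s hs) c0 c1 c2 c3 c4 c5 rest).mpr he).isInfix
      · rw [if_neg hhit, ← ih, Bool.eq_iff_iff]
        simp only [List.any_eq_true]
        constructor
        · rintro ⟨s, hs, hIn⟩
          refine ⟨s, hs, ?_⟩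
          rw [PySem.Chars.isIn_iff_infix] at hIn ⊢
          rcases List.infix_cons_iff.mp hIn with hp | hi
          · exact absurd ((pvHit_iff c0 c1 c2 c3 c4 c5).mpr
              ⟨s, hs, (pvPrefix_six (pvSeqs_len s hs) c0 c1 c2 c3 c4 c5 rest).mp hp⟩) hhit
          · exact hi
        · rintro ⟨s, hs, hIn⟩
          refine ⟨s, hs, ?_⟩
          rw [PySem.Chars.isIn_iff_infix] at hIn ⊢
          exact List.infix_cons_iff.mpr (Or.inr hIn)

-- ===== VERDICT (by name: the statement is the Claim_ definition above) =====
theorem has_problematic_unicode_py_spec : Claim_equal_has_problematic_unicode_py := by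
  intro text _
  unfold Spec_has_problematic_unicode_py has_problematic_unicode_py has_problematic_unicode_py_alt
  simp only [PySem.Str.isIn_eq]
  exact pvAny_eq_scan text.toList
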